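-- pv_equiv track=rewrite | github.com/samieze/INEv | Reproducibility_Submission/reproducibility/local_experiments/REPRO_muse_INev/aMuSE/generate_network.py | allEvents
-- ===== SOURCE A (Python) =====
-- def allEvents(nw):
--     if not nw:
--         return False
--     for i in range(len(nw[0])) :
--         column = [row[i] for row in nw]
--         if sum(column) == 0:
--             return False
--     return True
-- ===== SOURCE B (Python) =====
-- def allEvents(nw):
--     if not nw:
--         return False
--     ncol = len(nw[0])
--
--     def vsum(lo, hi):
--         # vector of per-column sums of rows nw[lo:hi], by divide and conquer
--         if lo + 1 == hi:
--             return [nw[lo][i] for i in range(ncol)]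
--         mid = (lo + hi) // 2
--         left = vsum(lo, mid)
--         right = vsum(mid, hi)
--         return [left[i] + right[i] for i in range(ncol)]
--
--     return 0 not in vsum(0, len(nw))
-- ===== Notes on version B (the rewrite author's own statement) =====
-- stated objective: alternative
-- what changed: Replaces A's column-major nested scan with early exit by a divide-and-conquer tree reduction: rows are recursively split in halves, each half reduced to a per-column sum vector, halves combined elementwise, and the result checked once by a membership test '0 not in totals'.
-- outside the precondition, e.g. on allEvents([[0, 5], [0]]): A returns False, B raises IndexError
import Mathlib
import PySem

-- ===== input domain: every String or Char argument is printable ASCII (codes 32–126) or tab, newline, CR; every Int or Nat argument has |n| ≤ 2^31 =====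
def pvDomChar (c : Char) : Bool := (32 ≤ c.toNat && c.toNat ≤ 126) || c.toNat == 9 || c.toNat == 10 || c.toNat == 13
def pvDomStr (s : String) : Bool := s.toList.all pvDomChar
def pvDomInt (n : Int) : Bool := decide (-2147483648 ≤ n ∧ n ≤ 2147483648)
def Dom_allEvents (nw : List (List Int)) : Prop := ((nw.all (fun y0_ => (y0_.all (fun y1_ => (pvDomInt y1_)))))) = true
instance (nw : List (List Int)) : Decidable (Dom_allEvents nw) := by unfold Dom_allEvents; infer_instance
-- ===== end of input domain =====

-- B replaces A's column-major nested scan (early exit per column) by a divide-and-conquer tree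
-- reduction over the rows plus one membership test; same cost, different algorithm (alternative).

-- ===== PORT A =====
-- for i in range(len(nw[0])): column = [row[i] for row in nw]; if sum(column)==0: return False
def aLoop (nw : List (List Int)) : List Int → Bool
  | [] => true
  | i :: rest =>
    let column := nw.map (fun row => PySem.List.pyGetD row i 0)
    if column.sum = 0 then false else aLoop nw rest

def allEvents (nw : List (List Int)) : Bool :=
  if nw = [] then false
  else aLoop nw (PySem.List.pyRange 0 ((nw.headD []).length : Int) 1)

-- ===== PORT B =====
-- vsum(lo, hi): divide-and-conquer per-column sum vector of rows nw[lo:hi]; ported with a fuel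
-- parameter (fuel = hi - lo suffices) only to make the well-founded Python recursion structural.
def vsum (nw : List (List Int)) (ncol : Nat) : Nat → Nat → Nat → List Int
  | 0, _, _ => []
  | fuel + 1, lo, hi =>
    if lo + 1 = hi then (List.range ncol).map (fun (i : Nat) => PySem.List.pyGetD (nw.getD lo []) ((i : Int)) 0)
    else
      let mid := (lo + hi) / 2
      let left := vsum nw ncol fuel lo mid
      let right := vsum nw ncol fuel mid hi
      (List.range ncol).map (fun (i : Nat) => PySem.List.pyGetD left ((i : Int)) 0 + PySem.List.pyGetD right ((i : Int)) 0)

def allEvents_alt (nw : List (List Int)) : Bool :=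
  if nw = [] then false
  else
    let ncol := (nw.headD []).length
    !((vsum nw ncol nw.length 0 nw.length).contains 0)

-- ===== PRECONDITION & SPEC =====
-- Pre_ excludes ragged matrices (some row shorter than the first row): there the Python A either
-- raises IndexError or returns an early False that B's full reduction cannot reach before raising.
def Pre_allEvents (nw : List (List Int)) : Prop :=
  ∀ row ∈ nw, (nw.headD []).length ≤ row.length
instance (nw : List (List Int)) : Decidable (Pre_allEvents nw) := by unfold Pre_allEvents; infer_instance
def pvWitness_allEvents : List (List Int) := [[1, 0], [2, 3]]

def Spec_allEvents (nw : List (List Int)) (out : Bool) : Prop := out = allEvents_alt nw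
instance (nw : List (List Int)) (out : Bool) : Decidable (Spec_allEvents nw out) := by unfold Spec_allEvents; infer_instance

-- ===== CLAIM (what is proved, stated in full; the proofs are below) =====
def Claim_equal_allEvents : Prop := ∀ (nw : List (List Int)), Dom_allEvents nw → Pre_allEvents nw → Spec_allEvents nw (allEvents nw)

-- ===== LEMMAS AND PROOFS =====

-- the per-column sum of the row segment nw[lo:hi], the value vsum computes at each node
def segSum (nw : List (List Int)) (lo hi : Nat) (j : Nat) : Int :=
  ((List.range' lo (hi - lo)).map (fun k => PySem.List.pyGetD (nw.getD k []) (j : Int) 0)).sum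

theorem segSum_split (nw : List (List Int)) (lo mid hi : Nat) (h1 : lo ≤ mid) (h2 : mid ≤ hi) (j : Nat) :
    segSum nw lo hi j = segSum nw lo mid j + segSum nw mid hi j := by
  unfold segSum
  have h0 : List.range' lo (mid - lo) 1 ++ List.range' (lo + 1 * (mid - lo)) (hi - mid) 1
      = List.range' lo ((mid - lo) + (hi - mid)) 1 := List.range'_append
  have h : List.range' lo (hi - lo) = List.range' lo (mid - lo) ++ List.range' mid (hi - mid) := by
    rw [show hi - lo = (mid - lo) + (hi - mid) from by omega, ← h0]
    congr 2
    omega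
  rw [h, List.map_append, List.sum_append]

theorem vsum_correct (nw : List (List Int)) (ncol : Nat) (fuel lo hi : Nat)
    (hlt : lo < hi) (hfuel : hi - lo ≤ fuel) :
    vsum nw ncol fuel lo hi = (List.range ncol).map (segSum nw lo hi) := by
  induction fuel generalizing lo hi with
  | zero => omega
  | succ f ih =>
    by_cases hbase : lo + 1 = hi
    · show (if lo + 1 = hi then _ else _) = _
      rw [if_pos hbase]
      apply List.map_congr_left
      intro j _
      have h1 : hi - lo = 1 := by omega
      simp [segSum, h1]
    · have hlo : lo + 1 < hi := by omega
      set mid := (lo + hi) / 2 with hmid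
      have hm1 : lo < mid := by omega
      have hm2 : mid < hi := by omega
      show (if lo + 1 = hi then _ else _) = _
      rw [if_neg hbase]
      show (List.range ncol).map (fun (i : Nat) =>
          PySem.List.pyGetD (vsum nw ncol f lo ((lo + hi) / 2)) ((i : Int)) 0 +
          PySem.List.pyGetD (vsum nw ncol f ((lo + hi) / 2) hi) ((i : Int)) 0) = _
      rw [show (lo + hi) / 2 = mid from rfl]
      rw [ih lo mid hm1 (by omega), ih mid hi hm2 (by omega)]
      apply List.map_congr_left
      intro j hj
      have hjn : j < ncol := List.mem_range.mp hj
      have hget : ∀ (f : Nat → Int), PySem.List.pyGetD ((List.range ncol).map f) (j : Int) 0 = f j := by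
        intro f
        rw [PySem.List.pyGetD_natCast]
        rw [List.getD_eq_getElem _ _ (by simpa using hjn)]
        simp
      rw [hget, hget, segSum_split nw lo mid hi (by omega) (by omega) j]

-- A's loop is an 'all' over the index list
theorem aLoop_eq_all (nw : List (List Int)) (is : List Int) :
    aLoop nw is = is.all (fun i => ((nw.map (fun row => PySem.List.pyGetD row i 0)).sum != 0)) := by
  induction is with
  | nil => rfl
  | cons i rest ih =>
    simp only [aLoop, List.all_cons, ih]
    split_ifs with h <;> simp [h]

-- the column sum over all rows is segSum 0 (length nw)
theorem map_range_getD {α β : Type} (xs : List α) (d : α) (f : α → β) :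
    (List.range xs.length).map (fun k => f (xs.getD k d)) = xs.map f := by
  apply List.ext_getElem
  · simp
  · intro i h1 h2
    simp only [List.getElem_map, List.getElem_range]
    rw [List.getD_eq_getElem _ _ (by simpa using h2)]

theorem segSum_full (nw : List (List Int)) (j : Nat) :
    segSum nw 0 nw.length j = (nw.map (fun row => PySem.List.pyGetD row (j : Int) 0)).sum := by
  unfold segSum
  congr 1
  rw [show List.range' 0 (nw.length - 0) = List.range nw.length by
        rw [Nat.sub_zero, List.range_eq_range']]
  exact map_range_getD nw [] (fun row => PySem.List.pyGetD row (j : Int) 0)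

theorem allEvents_spec : Claim_equal_allEvents := by
  intro nw _ _
  unfold Spec_allEvents allEvents allEvents_alt
  by_cases hnil : nw = []
  · simp [hnil]
  · have hlen : 0 < nw.length := List.length_pos_iff.mpr hnil
    simp only [hnil, ite_false]
    rw [aLoop_eq_all, vsum_correct nw _ nw.length 0 nw.length hlen (by omega)]
    rw [PySem.List.pyRange_one]
    simp only [zero_add, sub_zero, Int.toNat_natCast]
    simp only [List.all_map, List.contains_eq_mem, List.mem_map]
    rw [Bool.eq_iff_iff]
    simp only [List.all_eq_true, Function.comp, bne_iff_ne, ne_eq, Bool.not_eq_true',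
      decide_eq_false_iff_not, not_exists, not_and]
    constructor
    · intro h j hj heq
      exact h j hj (by rw [← segSum_full]; exact heq)
    · intro h j hj heq
      exact h j hj (by rw [segSum_full]; exact heq)
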